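-- pv_equiv track=rewrite | github.com/couchbaselabs/couchbase-lite-tests | environment/cbs/install_couchbase.py | get_codename
-- ===== SOURCE A (Python) =====
-- def get_codename(version):
--     # Define the versions and corresponding codenames in sorted order
--     version_mappings = [
--         ('5.0', 'spock'),
--         ('5.5', 'vulcan'),
--         ('6.0', 'alice'),
--         ('6.5', 'mad-hatter'),
--         ('7.0', 'cheshire-cat'),
--         ('7.1', 'neo'),
--         ('7.2', 'elixir'),
--         ('7.6', 'trinity'),
--         ('7.7', 'cypher'),
--         ('8.0', 'morpheus'),
--         ('8.1', 'magma-preview')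
--     ]
--
--     # Convert the version string to a tuple (major, minor) for easy comparison
--     major_minor_version = tuple(map(int, version.split('.')[:2]))
--
--     # Loop through the mappings and find where the version lies
--     for i in range(len(version_mappings) - 1):
--         lower_version = tuple(map(int, version_mappings[i][0].split('.')))
--         upper_version = tuple(map(int, version_mappings[i + 1][0].split('.')))
--
--         # Check if the version is within the range
--         if lower_version <= major_minor_version < upper_version:
--             return version_mappings[i][1]
--
--     # If the version is greater than or equal to the last entry, return its codename
--     return version_mappings[-1][1]  # Default to the last codename for versions >= 8.1
-- ===== SOURCE B (Python) =====
-- _BOUNDS = [(5, 0), (5, 5), (6, 0), (6, 5), (7, 0), (7, 1),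
--            (7, 2), (7, 6), (7, 7), (8, 0), (8, 1)]
-- _CODENAMES = ['spock', 'vulcan', 'alice', 'mad-hatter', 'cheshire-cat', 'neo',
--               'elixir', 'trinity', 'cypher', 'morpheus', 'magma-preview']
--
--
-- def get_codename(version):
--     # Binary search (hand-rolled bisect_right) over the precomputed bound index.
--     mmv = tuple(map(int, version.split('.')[:2]))
--     lo, hi = 0, len(_BOUNDS)
--     while lo < hi:
--         mid = (lo + hi) // 2
--         if mmv < _BOUNDS[mid]:
--             hi = mid
--         else:
--             lo = mid + 1
--     return _CODENAMES[lo - 1] if lo > 0 else _CODENAMES[-1]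
-- ===== Notes on version B (the rewrite author's own statement) =====
-- stated objective: alternative
-- what changed: Replaces A's linear scan that re-parses every bound string per iteration with a hand-rolled bisect_right binary search over a precomputed tuple index (with A's same fall-to-last-codename for versions below 5.0).
import Mathlib
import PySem

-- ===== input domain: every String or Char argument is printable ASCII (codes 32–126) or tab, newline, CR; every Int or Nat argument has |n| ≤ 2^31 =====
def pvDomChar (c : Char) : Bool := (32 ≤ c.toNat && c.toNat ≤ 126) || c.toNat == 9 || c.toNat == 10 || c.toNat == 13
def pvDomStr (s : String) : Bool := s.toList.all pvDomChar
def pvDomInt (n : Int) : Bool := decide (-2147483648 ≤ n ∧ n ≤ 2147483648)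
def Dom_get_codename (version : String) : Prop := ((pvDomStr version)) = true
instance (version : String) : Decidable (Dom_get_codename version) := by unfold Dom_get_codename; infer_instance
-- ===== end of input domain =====

-- B replaces A's linear range scan (which re-parses each bound string per iteration) with a
-- binary search over a precomputed bound index; same return value wherever A returns.

-- Python tuple comparison '<' and '<=' on int tuples (lexicographic, any lengths)
def pvLt : List Int → List Int → Bool
  | [], [] => false
  | [], _ :: _ => true
  | _ :: _, [] => false
  | a :: as, b :: bs => if a < b then true else if b < a then false else pvLt as bs

def pvLe : List Int → List Int → Bool
  | [], _ => true
  | _ :: _, [] => false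
  | a :: as, b :: bs => if a < b then true else if b < a then false else pvLe as bs

-- tuple(map(int, l)) : none iff some element fails int()  (shared: this line occurs in both Pythons)
def pvIntTuple (l : List String) : Option (List Int) := l.mapM PySem.Int.ofStr?

-- ===== PORT A =====
def pvMappings : List (String × String) :=
  [("5.0", "spock"), ("5.5", "vulcan"), ("6.0", "alice"), ("6.5", "mad-hatter"),
   ("7.0", "cheshire-cat"), ("7.1", "neo"), ("7.2", "elixir"), ("7.6", "trinity"),
   ("7.7", "cypher"), ("8.0", "morpheus"), ("8.1", "magma-preview")]

-- tuple(map(int, s.split('.'))) for the table's literal bound strings (these always parse)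
def pvParseBound (s : String) : List Int :=
  (pvIntTuple ((PySem.Str.split? s ".").getD [])).getD []

-- the 'for i in range(len(version_mappings) - 1)' loop (indices are always in range)
def pvLoopA (mmv : List Int) (i : Nat) : String :=
  if i < pvMappings.length - 1 then
    let lower := pvParseBound (pvMappings.getD i ("", "")).1
    let upper := pvParseBound (pvMappings.getD (i + 1) ("", "")).1
    if pvLe lower mmv && pvLt mmv upper then (pvMappings.getD i ("", "")).2
    else pvLoopA mmv (i + 1)
  else (pvMappings.getLastD ("", "")).2    -- version_mappings[-1][1]
termination_by pvMappings.length - i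

def get_codename (version : String) : String :=
  match pvIntTuple (PySem.List.slice ((PySem.Str.split? version ".").getD []) none (some 2)) with
  | none => ""    -- Python raises ValueError here; excluded by Pre_
  | some mmv => pvLoopA mmv 0

-- ===== PORT B =====
def pvBounds : List (List Int) :=
  [[5, 0], [5, 5], [6, 0], [6, 5], [7, 0], [7, 1], [7, 2], [7, 6], [7, 7], [8, 0], [8, 1]]

def pvCodenames : List String :=
  ["spock", "vulcan", "alice", "mad-hatter", "cheshire-cat", "neo",
   "elixir", "trinity", "cypher", "morpheus", "magma-preview"]

-- the while-loop: hand-rolled bisect_right (mid index is always in range)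
def pvBisect (mmv : List Int) (lo hi : Nat) : Nat :=
  if lo < hi then
    let mid := (lo + hi) / 2
    if pvLt mmv (pvBounds.getD mid []) then pvBisect mmv lo mid
    else pvBisect mmv (mid + 1) hi
  else lo
termination_by hi - lo

def pvSelect (mmv : List Int) : String :=
  let lo := pvBisect mmv 0 pvBounds.length
  if lo > 0 then pvCodenames.getD (lo - 1) "" else pvCodenames.getLastD ""   -- _CODENAMES[-1]

def get_codename_alt (version : String) : String :=
  match pvIntTuple (PySem.List.slice ((PySem.Str.split? version ".").getD []) none (some 2)) with
  | none => ""
  | some mmv => pvSelect mmv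

-- ===== PRECONDITION & SPEC =====
-- A raises ValueError iff some of the first two '.'-separated pieces is not int()-parsable; Pre_ excludes exactly those.
def Pre_get_codename (version : String) : Prop :=
  (PySem.List.slice ((PySem.Str.split? version ".").getD []) none (some 2)).all
    (fun s => (PySem.Int.ofStr? s).isSome) = true

instance (version : String) : Decidable (Pre_get_codename version) := by
  unfold Pre_get_codename; infer_instance

def pvWitness_get_codename : String := "7.2.0"

def Spec_get_codename (version : String) (out : String) : Prop := out = get_codename_alt version
instance (version : String) (out : String) : Decidable (Spec_get_codename version out) := by unfold Spec_get_codename; infer_instance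

-- ===== CLAIM (what is proved, stated in full; the proofs are below) =====
def Claim_equal_get_codename : Prop := ∀ (version : String), Dom_get_codename version → Pre_get_codename version → Spec_get_codename version (get_codename version)

-- ===== LEMMAS AND PROOFS =====
theorem pvLt_cons_iff (a b : Int) (as bs : List Int) :
    pvLt (a :: as) (b :: bs) = true ↔ a < b ∨ (a = b ∧ pvLt as bs = true) := by
  simp only [pvLt]
  split_ifs with h h'
  · simp [h]
  · simp only [false_iff]
    rintro (h2 | ⟨h2, _⟩) <;> omega
  · have e : a = b := by omega
    subst e
    simp

theorem pvLt_trans {x y z : List Int} (h1 : pvLt x y = true) (h2 : pvLt y z = true) :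
    pvLt x z = true := by
  induction x generalizing y z with
  | nil =>
    cases y with
    | nil => simp [pvLt] at h1
    | cons b bs =>
      cases z with
      | nil => simp [pvLt] at h2
      | cons c cs => simp [pvLt]
  | cons a as ih =>
    cases y with
    | nil => simp [pvLt] at h1
    | cons b bs =>
      cases z with
      | nil => simp [pvLt] at h2
      | cons c cs =>
        rw [pvLt_cons_iff] at h1 h2 ⊢
        rcases h1 with h1 | ⟨e1, h1⟩ <;> rcases h2 with h2 | ⟨e2, h2⟩
        · exact Or.inl (by omega)
        · exact Or.inl (by omega)
        · exact Or.inl (by omega)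
        · exact Or.inr ⟨by omega, ih h1 h2⟩

theorem pvLt_mono_true {x a b : List Int} (hab : pvLt a b = true) (h : pvLt x a = true) :
    pvLt x b = true := pvLt_trans h hab

theorem pvLe_not_lt (x y : List Int) : pvLe x y = !pvLt y x := by
  induction x generalizing y with
  | nil => cases y <;> simp [pvLe, pvLt]
  | cons a as ih =>
    cases y with
    | nil => simp [pvLe, pvLt]
    | cons b bs =>
      simp only [pvLe, pvLt]
      split_ifs <;> simp_all
      omega

theorem pvParseBound_vals :
    pvParseBound "5.0" = [5, 0] ∧ pvParseBound "5.5" = [5, 5] ∧ pvParseBound "6.0" = [6, 0] ∧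
    pvParseBound "6.5" = [6, 5] ∧ pvParseBound "7.0" = [7, 0] ∧ pvParseBound "7.1" = [7, 1] ∧
    pvParseBound "7.2" = [7, 2] ∧ pvParseBound "7.6" = [7, 6] ∧ pvParseBound "7.7" = [7, 7] ∧
    pvParseBound "8.0" = [8, 0] ∧ pvParseBound "8.1" = [8, 1] := by decide

theorem pvIntTuple_isSome {l : List String}
    (h : l.all (fun s => (PySem.Int.ofStr? s).isSome) = true) :
    ∃ v, pvIntTuple l = some v := by
  induction l with
  | nil => exact ⟨[], rfl⟩
  | cons s rest ih =>
    simp only [List.all_cons, Bool.and_eq_true] at h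
    obtain ⟨v, hv⟩ := ih h.2
    obtain ⟨n, hn⟩ := Option.isSome_iff_exists.mp h.1
    refine ⟨n :: v, ?_⟩
    simp only [pvIntTuple] at hv ⊢
    simp [List.mapM_cons, hn, hv]

theorem pvCore (mmv : List Int) : pvLoopA mmv 0 = pvSelect mmv := by
  by_cases h0 : pvLt mmv [(5:Int),0] = true
  · have g1 : pvLt mmv [(5:Int),5] = true := pvLt_mono_true (by decide) h0
    have g2 : pvLt mmv [(6:Int),0] = true := pvLt_mono_true (by decide) h0
    have g3 : pvLt mmv [(6:Int),5] = true := pvLt_mono_true (by decide) h0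
    have g4 : pvLt mmv [(7:Int),0] = true := pvLt_mono_true (by decide) h0
    have g5 : pvLt mmv [(7:Int),1] = true := pvLt_mono_true (by decide) h0
    have g6 : pvLt mmv [(7:Int),2] = true := pvLt_mono_true (by decide) h0
    have g7 : pvLt mmv [(7:Int),6] = true := pvLt_mono_true (by decide) h0
    have g8 : pvLt mmv [(7:Int),7] = true := pvLt_mono_true (by decide) h0
    have g9 : pvLt mmv [(8:Int),0] = true := pvLt_mono_true (by decide) h0
    have g10 : pvLt mmv [(8:Int),1] = true := pvLt_mono_true (by decide) h0
    simp [pvLoopA, pvBisect, pvSelect, pvLe_not_lt, pvParseBound_vals, pvMappings, pvBounds, pvCodenames, List.getLastD, h0, g1, g2, g3, g4, g5, g6, g7, g8, g9, g10]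
  · simp only [Bool.not_eq_true] at h0
    by_cases h1 : pvLt mmv [(5:Int),5] = true
    · have g2 : pvLt mmv [(6:Int),0] = true := pvLt_mono_true (by decide) h1
      have g3 : pvLt mmv [(6:Int),5] = true := pvLt_mono_true (by decide) h1
      have g4 : pvLt mmv [(7:Int),0] = true := pvLt_mono_true (by decide) h1
      have g5 : pvLt mmv [(7:Int),1] = true := pvLt_mono_true (by decide) h1
      have g6 : pvLt mmv [(7:Int),2] = true := pvLt_mono_true (by decide) h1
      have g7 : pvLt mmv [(7:Int),6] = true := pvLt_mono_true (by decide) h1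
      have g8 : pvLt mmv [(7:Int),7] = true := pvLt_mono_true (by decide) h1
      have g9 : pvLt mmv [(8:Int),0] = true := pvLt_mono_true (by decide) h1
      have g10 : pvLt mmv [(8:Int),1] = true := pvLt_mono_true (by decide) h1
      simp [pvLoopA, pvBisect, pvSelect, pvLe_not_lt, pvParseBound_vals, pvMappings, pvBounds, pvCodenames, h0, h1, g2, g5]
    · simp only [Bool.not_eq_true] at h1
      by_cases h2 : pvLt mmv [(6:Int),0] = true
      · have g3 : pvLt mmv [(6:Int),5] = true := pvLt_mono_true (by decide) h2
        have g4 : pvLt mmv [(7:Int),0] = true := pvLt_mono_true (by decide) h2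
        have g5 : pvLt mmv [(7:Int),1] = true := pvLt_mono_true (by decide) h2
        have g6 : pvLt mmv [(7:Int),2] = true := pvLt_mono_true (by decide) h2
        have g7 : pvLt mmv [(7:Int),6] = true := pvLt_mono_true (by decide) h2
        have g8 : pvLt mmv [(7:Int),7] = true := pvLt_mono_true (by decide) h2
        have g9 : pvLt mmv [(8:Int),0] = true := pvLt_mono_true (by decide) h2
        have g10 : pvLt mmv [(8:Int),1] = true := pvLt_mono_true (by decide) h2
        simp [pvLoopA, pvBisect, pvSelect, pvLe_not_lt, pvParseBound_vals, pvMappings, pvBounds, pvCodenames, h0, h1, h2, g5]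
      · simp only [Bool.not_eq_true] at h2
        by_cases h3 : pvLt mmv [(6:Int),5] = true
        · have g4 : pvLt mmv [(7:Int),0] = true := pvLt_mono_true (by decide) h3
          have g5 : pvLt mmv [(7:Int),1] = true := pvLt_mono_true (by decide) h3
          have g6 : pvLt mmv [(7:Int),2] = true := pvLt_mono_true (by decide) h3
          have g7 : pvLt mmv [(7:Int),6] = true := pvLt_mono_true (by decide) h3
          have g8 : pvLt mmv [(7:Int),7] = true := pvLt_mono_true (by decide) h3
          have g9 : pvLt mmv [(8:Int),0] = true := pvLt_mono_true (by decide) h3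
          have g10 : pvLt mmv [(8:Int),1] = true := pvLt_mono_true (by decide) h3
          simp [pvLoopA, pvBisect, pvSelect, pvLe_not_lt, pvParseBound_vals, pvMappings, pvBounds, pvCodenames, h0, h1, h2, h3, g4, g5]
        · simp only [Bool.not_eq_true] at h3
          by_cases h4 : pvLt mmv [(7:Int),0] = true
          · have g5 : pvLt mmv [(7:Int),1] = true := pvLt_mono_true (by decide) h4
            have g6 : pvLt mmv [(7:Int),2] = true := pvLt_mono_true (by decide) h4
            have g7 : pvLt mmv [(7:Int),6] = true := pvLt_mono_true (by decide) h4
            have g8 : pvLt mmv [(7:Int),7] = true := pvLt_mono_true (by decide) h4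
            have g9 : pvLt mmv [(8:Int),0] = true := pvLt_mono_true (by decide) h4
            have g10 : pvLt mmv [(8:Int),1] = true := pvLt_mono_true (by decide) h4
            simp [pvLoopA, pvBisect, pvSelect, pvLe_not_lt, pvParseBound_vals, pvMappings, pvBounds, pvCodenames, h0, h1, h2, h3, h4, g5]
          · simp only [Bool.not_eq_true] at h4
            by_cases h5 : pvLt mmv [(7:Int),1] = true
            · have g6 : pvLt mmv [(7:Int),2] = true := pvLt_mono_true (by decide) h5
              have g7 : pvLt mmv [(7:Int),6] = true := pvLt_mono_true (by decide) h5
              have g8 : pvLt mmv [(7:Int),7] = true := pvLt_mono_true (by decide) h5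
              have g9 : pvLt mmv [(8:Int),0] = true := pvLt_mono_true (by decide) h5
              have g10 : pvLt mmv [(8:Int),1] = true := pvLt_mono_true (by decide) h5
              simp [pvLoopA, pvBisect, pvSelect, pvLe_not_lt, pvParseBound_vals, pvMappings, pvBounds, pvCodenames, h0, h1, h2, h3, h4, h5]
            · simp only [Bool.not_eq_true] at h5
              by_cases h6 : pvLt mmv [(7:Int),2] = true
              · have g7 : pvLt mmv [(7:Int),6] = true := pvLt_mono_true (by decide) h6
                have g8 : pvLt mmv [(7:Int),7] = true := pvLt_mono_true (by decide) h6
                have g9 : pvLt mmv [(8:Int),0] = true := pvLt_mono_true (by decide) h6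
                have g10 : pvLt mmv [(8:Int),1] = true := pvLt_mono_true (by decide) h6
                simp [pvLoopA, pvBisect, pvSelect, pvLe_not_lt, pvParseBound_vals, pvMappings, pvBounds, pvCodenames, h0, h1, h2, h3, h4, h5, h6, g7, g8]
              · simp only [Bool.not_eq_true] at h6
                by_cases h7 : pvLt mmv [(7:Int),6] = true
                · have g8 : pvLt mmv [(7:Int),7] = true := pvLt_mono_true (by decide) h7
                  have g9 : pvLt mmv [(8:Int),0] = true := pvLt_mono_true (by decide) h7
                  have g10 : pvLt mmv [(8:Int),1] = true := pvLt_mono_true (by decide) h7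
                  simp [pvLoopA, pvBisect, pvSelect, pvLe_not_lt, pvParseBound_vals, pvMappings, pvBounds, pvCodenames, h0, h1, h2, h3, h4, h5, h6, h7, g8]
                · simp only [Bool.not_eq_true] at h7
                  by_cases h8 : pvLt mmv [(7:Int),7] = true
                  · have g9 : pvLt mmv [(8:Int),0] = true := pvLt_mono_true (by decide) h8
                    have g10 : pvLt mmv [(8:Int),1] = true := pvLt_mono_true (by decide) h8
                    simp [pvLoopA, pvBisect, pvSelect, pvLe_not_lt, pvParseBound_vals, pvMappings, pvBounds, pvCodenames, h0, h1, h2, h3, h4, h5, h6, h7, h8]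
                  · simp only [Bool.not_eq_true] at h8
                    by_cases h9 : pvLt mmv [(8:Int),0] = true
                    · have g10 : pvLt mmv [(8:Int),1] = true := pvLt_mono_true (by decide) h9
                      simp [pvLoopA, pvBisect, pvSelect, pvLe_not_lt, pvParseBound_vals, pvMappings, pvBounds, pvCodenames, h0, h1, h2, h3, h4, h5, h6, h7, h8, h9, g10]
                    · simp only [Bool.not_eq_true] at h9
                      by_cases h10 : pvLt mmv [(8:Int),1] = true
                      · simp [pvLoopA, pvBisect, pvSelect, pvLe_not_lt, pvParseBound_vals, pvMappings, pvBounds, pvCodenames, h0, h1, h2, h3, h4, h5, h6, h7, h8, h9, h10]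
                      · simp only [Bool.not_eq_true] at h10
                        simp [pvLoopA, pvBisect, pvSelect, pvLe_not_lt, pvParseBound_vals, pvMappings, pvBounds, pvCodenames, List.getLastD, h0, h1, h2, h3, h4, h5, h6, h7, h8, h9, h10]

-- ===== VERDICT (by name: the statement is the Claim_ definition above) =====
theorem get_codename_spec : Claim_equal_get_codename := by
  intro version _ hpre
  unfold Spec_get_codename get_codename get_codename_alt
  obtain ⟨mmv, hm⟩ := pvIntTuple_isSome hpre
  rw [hm]
  exact pvCore mmv
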